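-- pv_equiv track=rewrite | github.com/tarunpre/dsa-cracker | codility/alpha.py | solution
-- ===== SOURCE A (Python) =====
-- def solution(S):
--     dic = {}
--     cnt = 0
--     for k in S:
--         dic[k.lower()] = 0
--     for c in S:
--         if c.isupper():
--             cl = c.lower()
--             if dic[cl] == 0:
--                 dic[cl] = -1
--             elif dic[cl] == 1:
--                 dic[cl] = 2
--         else:
--             if dic[c] == 0:
--                 dic[c] += 1
--             elif dic[c] == 2:
--                 dic[c] = -1
--     for k, v in dic.items():
--         if v == 2:
--             cnt += 1
--     return cnt
-- ===== SOURCE B (Python) =====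
-- def solution(S):
--     first_upper = {}
--     last_lower = {}
--     for i, c in enumerate(S):
--         k = c.lower()
--         if c.isupper():
--             if k not in first_upper:
--                 first_upper[k] = i
--         else:
--             last_lower[k] = i
--     return sum(1 for k, i in first_upper.items() if k in last_lower and last_lower[k] < i)
-- ===== Notes on version B (the rewrite author's own statement) =====
-- stated objective: alternative
-- what changed: Replaced A's per-letter 0/1/2/-1 state machine (preset dict pass + transition pass) by one enumerate pass collecting first-uppercase-index and last-lowercase-index tables, then counting keys present in both with last_lower[k] < first_upper[k].
import Mathlib
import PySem

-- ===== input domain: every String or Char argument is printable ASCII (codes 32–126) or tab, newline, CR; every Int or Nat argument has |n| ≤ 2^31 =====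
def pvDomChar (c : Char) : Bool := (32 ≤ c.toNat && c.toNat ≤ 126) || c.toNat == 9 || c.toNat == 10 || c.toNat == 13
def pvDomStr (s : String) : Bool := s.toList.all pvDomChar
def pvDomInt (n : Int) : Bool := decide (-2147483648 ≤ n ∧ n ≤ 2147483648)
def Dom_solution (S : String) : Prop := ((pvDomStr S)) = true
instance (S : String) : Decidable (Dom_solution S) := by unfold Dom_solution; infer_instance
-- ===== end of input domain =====

-- B replaces A's per-letter 0/1/2/-1 state machine by first-uppercase/last-lowercase
-- index tables collected in one enumerate pass and compared at the end (objective: alternative).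

-- ===== PORT A =====
-- the preset loop 'for k in S: dic[k.lower()] = 0'
def pvPreset (cs : List Char) : PySem.Dict Char Int :=
  cs.foldl (fun d k => d.insert (PySem.Chars.lowerChar k) 0) PySem.Dict.empty

-- one iteration of 'for c in S: …'; dic[cl] is ported as getD cl 0, exact because the
-- preset loop put every key this loop reads into dic (so Python's [] never raises here)
def pvStepA (d : PySem.Dict Char Int) (c : Char) : PySem.Dict Char Int :=
  if PySem.Chars.isupper c then
    let cl := PySem.Chars.lowerChar c
    if d.getD cl 0 = 0 then d.insert cl (-1)
    else if d.getD cl 0 = 1 then d.insert cl 2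
    else d
  else
    if d.getD c 0 = 0 then d.insert c (d.getD c 0 + 1)
    else if d.getD c 0 = 2 then d.insert c (-1)
    else d

def solution (S : String) : Int :=
  let dic := S.toList.foldl pvStepA (pvPreset S.toList)
  dic.items.foldl (fun cnt kv => if kv.2 = 2 then cnt + 1 else cnt) 0

-- ===== PORT B =====
-- one iteration of 'for i, c in enumerate(S): …' over the pair (first_upper, last_lower)
def pvStepB (s : PySem.Dict Char Int × PySem.Dict Char Int) (p : Int × Char) :
    PySem.Dict Char Int × PySem.Dict Char Int :=
  let k := PySem.Chars.lowerChar p.2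
  if PySem.Chars.isupper p.2 then
    (if s.1.contains k then s.1 else s.1.insert k p.1, s.2)
  else
    (s.1, s.2.insert k p.1)

def solution_alt (S : String) : Int :=
  let fl := (PySem.List.enumerate S.toList).foldl pvStepB (PySem.Dict.empty, PySem.Dict.empty)
  fl.1.items.foldl
    (fun cnt kv => if fl.2.contains kv.1 ∧ fl.2.getD kv.1 0 < kv.2 then cnt + 1 else cnt) 0

-- ===== PRECONDITION & SPEC =====
def Spec_solution (S : String) (out : Int) : Prop := out = solution_alt S
instance (S : String) (out : Int) : Decidable (Spec_solution S out) := by unfold Spec_solution; infer_instance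

-- ===== CLAIM (what is proved, stated in full; the proofs are below) =====
def Claim_equal_solution : Prop := ∀ (S : String), Dom_solution S → Spec_solution S (solution S)

-- ===== LEMMAS AND PROOFS =====

-- the coupling invariant: after processing a prefix (next index n), A's per-letter state
-- is determined by B's two index tables
def pvInv (n : Int) (d fu ll : PySem.Dict Char Int) : Prop :=
  ∀ k : Char,
    (fu.get? k = none → ll.get? k = none → (d.get? k = none ∨ d.get? k = some 0)) ∧
    (∀ j, fu.get? k = none → ll.get? k = some j → d.get? k = some 1 ∧ j < n) ∧
    (∀ i, fu.get? k = some i → ll.get? k = none → d.get? k = some (-1) ∧ i < n) ∧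
    (∀ i j, fu.get? k = some i → ll.get? k = some j →
      d.get? k = some (if j < i then 2 else -1) ∧ i < n ∧ j < n)

theorem pvLowerChar_of_not_upper {c : Char} (h : ¬ PySem.Chars.isupper c = true) :
    PySem.Chars.lowerChar c = c := by
  simp [PySem.Chars.lowerChar, h]

theorem pvInv_step (n : Int) (d fu ll : PySem.Dict Char Int) (c : Char)
    (h : pvInv n d fu ll) :
    pvInv (n + 1) (pvStepA d c) (pvStepB (fu, ll) (n, c)).1 (pvStepB (fu, ll) (n, c)).2 := by
  intro k
  have hk := h k
  by_cases hu : PySem.Chars.isupper c = true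
  · by_cases hkeq : k = PySem.Chars.lowerChar c
    · subst hkeq
      have hk0 := h (PySem.Chars.lowerChar c)
      rcases hfu : fu.get? (PySem.Chars.lowerChar c) with _ | i
      · rcases hll : ll.get? (PySem.Chars.lowerChar c) with _ | j
        · simp only [pvStepA, pvStepB, hu, if_true, PySem.Dict.getD_eq_get?_getD,
            PySem.Dict.contains_eq_isSome_get?, hfu, Option.isSome_none, Bool.false_eq_true,
            if_false, PySem.Dict.get?_insert_self]
          rcases hk0.1 hfu hll with h0 | h0 <;>
            simp [h0, PySem.Dict.get?_insert_self, hll]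
        · obtain ⟨h0, hj⟩ := (hk0.2.1) j hfu hll
          simp only [pvStepA, pvStepB, hu, if_true, PySem.Dict.getD_eq_get?_getD,
            PySem.Dict.contains_eq_isSome_get?, hfu, Option.isSome_none, Bool.false_eq_true,
            if_false, h0, Option.getD_some, PySem.Dict.get?_insert_self]
          simp [hll, PySem.Dict.get?_insert_self]
          omega
      · rcases hll : ll.get? (PySem.Chars.lowerChar c) with _ | j
        · obtain ⟨h0, hi⟩ := (hk0.2.2.1) i hfu hll
          simp only [pvStepA, pvStepB, hu, if_true, PySem.Dict.getD_eq_get?_getD,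
            PySem.Dict.contains_eq_isSome_get?, hfu, Option.isSome_some, if_true, h0,
            Option.getD_some]
          norm_num
          simp [hll, h0]
          omega
        · obtain ⟨h0, hi, hj⟩ := (hk0.2.2.2) i j hfu hll
          simp only [pvStepA, pvStepB, hu, if_true, PySem.Dict.getD_eq_get?_getD,
            PySem.Dict.contains_eq_isSome_get?, hfu, Option.isSome_some, if_true, h0,
            Option.getD_some]
          by_cases hji : j < i <;>
            simp [hji, hll, h0] <;> omega
    · have hd' : (pvStepA d c).get? k = d.get? k := by
        simp only [pvStepA, hu, if_true]
        split_ifs <;> first | rfl | rw [PySem.Dict.get?_insert_of_ne _ _ hkeq]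
      have hfu' : ((pvStepB (fu, ll) (n, c)).1).get? k = fu.get? k := by
        simp only [pvStepB, hu, if_true]
        split_ifs <;> first | rfl | rw [PySem.Dict.get?_insert_of_ne _ _ hkeq]
      have hll' : ((pvStepB (fu, ll) (n, c)).2).get? k = ll.get? k := by
        simp only [pvStepB, hu, if_true]
      rw [hd', hfu', hll']
      obtain ⟨h1, h2, h3, h4⟩ := hk
      exact ⟨h1, fun j a b => ⟨(h2 j a b).1, by have := (h2 j a b).2; omega⟩,
        fun i a b => ⟨(h3 i a b).1, by have := (h3 i a b).2; omega⟩,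
        fun i j a b => ⟨(h4 i j a b).1, by have := (h4 i j a b).2.1; omega,
          by have := (h4 i j a b).2.2; omega⟩⟩
  · have hl : PySem.Chars.lowerChar c = c := pvLowerChar_of_not_upper hu
    by_cases hkeq : k = c
    · subst hkeq
      rcases hfu : fu.get? k with _ | i
      · rcases hll : ll.get? k with _ | j
        · simp only [pvStepA, pvStepB, hu, Bool.false_eq_true, if_false, hl,
            PySem.Dict.getD_eq_get?_getD, hfu, PySem.Dict.get?_insert_self]
          rcases hk.1 hfu hll with h0 | h0 <;>
            simp [h0, PySem.Dict.get?_insert_self]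
        · obtain ⟨h0, hj⟩ := (hk.2.1) j hfu hll
          simp only [pvStepA, pvStepB, hu, Bool.false_eq_true, if_false, hl,
            PySem.Dict.getD_eq_get?_getD, h0, Option.getD_some,
            PySem.Dict.get?_insert_self]
          norm_num
          simp [hfu, h0]
      · rcases hll : ll.get? k with _ | j
        · obtain ⟨h0, hi⟩ := (hk.2.2.1) i hfu hll
          simp only [pvStepA, pvStepB, hu, Bool.false_eq_true, if_false, hl,
            PySem.Dict.getD_eq_get?_getD, h0, Option.getD_some,
            PySem.Dict.get?_insert_self]
          norm_num
          simp [hfu, h0]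
          omega
        · obtain ⟨h0, hi, hj⟩ := (hk.2.2.2) i j hfu hll
          by_cases hji : j < i
          · simp only [if_pos hji] at h0
            simp only [pvStepA, pvStepB, hu, Bool.false_eq_true, if_false, hl,
              PySem.Dict.getD_eq_get?_getD, h0, Option.getD_some,
              PySem.Dict.get?_insert_self]
            norm_num
            simp [hfu]
            omega
          · simp only [if_neg hji] at h0
            simp only [pvStepA, pvStepB, hu, Bool.false_eq_true, if_false, hl,
              PySem.Dict.getD_eq_get?_getD, h0, Option.getD_some,
              PySem.Dict.get?_insert_self]
            norm_num
            simp [hfu, h0]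
            omega
    · have hd' : (pvStepA d c).get? k = d.get? k := by
        simp only [pvStepA, hu, Bool.false_eq_true, if_false]
        split_ifs <;> first | rfl | rw [PySem.Dict.get?_insert_of_ne _ _ hkeq]
      have hfu' : ((pvStepB (fu, ll) (n, c)).1).get? k = fu.get? k := by
        simp only [pvStepB, hu, Bool.false_eq_true, if_false]
      have hll' : ((pvStepB (fu, ll) (n, c)).2).get? k = ll.get? k := by
        simp only [pvStepB, hu, Bool.false_eq_true, if_false]
        rw [hl, PySem.Dict.get?_insert_of_ne _ _ hkeq]
      rw [hd', hfu', hll']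
      obtain ⟨h1, h2, h3, h4⟩ := hk
      exact ⟨h1, fun j a b => ⟨(h2 j a b).1, by have := (h2 j a b).2; omega⟩,
        fun i a b => ⟨(h3 i a b).1, by have := (h3 i a b).2; omega⟩,
        fun i j a b => ⟨(h4 i j a b).1, by have := (h4 i j a b).2.1; omega,
          by have := (h4 i j a b).2.2; omega⟩⟩

theorem pvInv_fold (cs : List Char) : ∀ (n : Int) (d fu ll : PySem.Dict Char Int),
    pvInv n d fu ll →
    pvInv (n + cs.length) (cs.foldl pvStepA d)
      ((PySem.List.enumerate cs n).foldl pvStepB (fu, ll)).1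
      ((PySem.List.enumerate cs n).foldl pvStepB (fu, ll)).2 := by
  induction cs with
  | nil =>
    intro n d fu ll h
    simpa [PySem.List.enumerate] using h
  | cons c t ih =>
    intro n d fu ll h
    rw [PySem.List.enumerate_cons]
    simp only [List.foldl_cons, List.length_cons]
    have h2 := ih (n + 1) (pvStepA d c) (pvStepB (fu, ll) (n, c)).1
      (pvStepB (fu, ll) (n, c)).2 (pvInv_step n d fu ll c h)
    rw [Prod.mk.eta] at h2
    have harith : n + ((t.length : Int) + 1) = n + 1 + (t.length : Int) := by ring
    push_cast
    rw [harith]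
    exact h2

theorem pvPreset_get? (cs : List Char) : ∀ (d : PySem.Dict Char Int),
    (∀ k, d.get? k = none ∨ d.get? k = some 0) → ∀ k,
    (cs.foldl (fun d k => d.insert (PySem.Chars.lowerChar k) 0) d).get? k = none ∨
    (cs.foldl (fun d k => d.insert (PySem.Chars.lowerChar k) 0) d).get? k = some 0 := by
  induction cs with
  | nil => intro d hd k; exact hd k
  | cons c t ih =>
    intro d hd k
    refine ih _ (fun k' => ?_) k
    by_cases hk : k' = PySem.Chars.lowerChar c
    · subst hk; right; exact PySem.Dict.get?_insert_self _ _ _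
    · rw [PySem.Dict.get?_insert_of_ne _ _ hk]; exact hd k'

theorem pvInv_init (cs : List Char) :
    pvInv 0 (pvPreset cs) PySem.Dict.empty PySem.Dict.empty := by
  intro k
  refine ⟨fun _ _ => ?_, fun j _ hf => ?_, fun i hf _ => ?_, fun i j hf _ => ?_⟩
  · exact pvPreset_get? cs PySem.Dict.empty (fun k' => Or.inl (PySem.Dict.get?_empty k')) k
  all_goals simp [PySem.Dict.get?_empty] at hf

-- keys stay duplicate-free through A's second loop
theorem pvStepA_nodup (d : PySem.Dict Char Int) (c : Char) (h : d.keys.Nodup) :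
    (pvStepA d c).keys.Nodup := by
  unfold pvStepA
  dsimp only
  split_ifs <;> first | exact h | exact PySem.Dict.nodup_keys_insert _ _ _ h

theorem pvFoldA_nodup (cs : List Char) : ∀ (d : PySem.Dict Char Int), d.keys.Nodup →
    (cs.foldl pvStepA d).keys.Nodup := by
  induction cs with
  | nil => intro d h; exact h
  | cons c t ih => intro d h; exact ih _ (pvStepA_nodup d c h)

theorem pvStepB_nodup (s : PySem.Dict Char Int × PySem.Dict Char Int) (p : Int × Char)
    (h1 : s.1.keys.Nodup) (h2 : s.2.keys.Nodup) :
    (pvStepB s p).1.keys.Nodup ∧ (pvStepB s p).2.keys.Nodup := by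
  unfold pvStepB
  dsimp only
  split_ifs <;>
    exact ⟨by first | exact h1 | exact PySem.Dict.nodup_keys_insert _ _ _ h1,
           by first | exact h2 | exact PySem.Dict.nodup_keys_insert _ _ _ h2⟩

theorem pvFoldB_nodup (ps : List (Int × Char)) :
    ∀ (s : PySem.Dict Char Int × PySem.Dict Char Int), s.1.keys.Nodup → s.2.keys.Nodup →
    (ps.foldl pvStepB s).1.keys.Nodup ∧ (ps.foldl pvStepB s).2.keys.Nodup := by
  induction ps with
  | nil => intro s h1 h2; exact ⟨h1, h2⟩
  | cons p t ih =>
    intro s h1 h2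
    obtain ⟨g1, g2⟩ := pvStepB_nodup s p h1 h2
    exact ih _ g1 g2

-- the set of counted letters, read off B's two tables
def pvChar (fu ll : PySem.Dict Char Int) (k : Char) : Bool :=
  match fu.get? k, ll.get? k with
  | some i, some j => decide (j < i)
  | _, _ => false

theorem pvPreset_nodup (cs : List Char) : (pvPreset cs).keys.Nodup :=
  PySem.Dict.nodup_keys_foldl_insert_key cs PySem.Chars.lowerChar (fun _ _ => 0)
    PySem.Dict.empty (PySem.Dict.nodup_keys_empty)

theorem pvMain (S : String) : solution S = solution_alt S := by
  have inv := pvInv_fold S.toList 0 (pvPreset S.toList) PySem.Dict.empty PySem.Dict.empty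
    (pvInv_init S.toList)
  set cs := S.toList with hcs
  set dA := cs.foldl pvStepA (pvPreset cs) with hdA
  set fl := (PySem.List.enumerate cs 0).foldl pvStepB (PySem.Dict.empty, PySem.Dict.empty) with hfl
  have ndA : dA.keys.Nodup := pvFoldA_nodup cs _ (pvPreset_nodup cs)
  have ndB := pvFoldB_nodup (PySem.List.enumerate cs 0) (PySem.Dict.empty, PySem.Dict.empty)
    PySem.Dict.nodup_keys_empty PySem.Dict.nodup_keys_empty
  -- the per-key characterisation of A's final dict
  have hchar : ∀ k, (dA.get? k = some 2 ↔ pvChar fl.1 fl.2 k = true) := by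
    intro k
    obtain ⟨h1, h2, h3, h4⟩ := inv k
    unfold pvChar
    rcases hfu : fl.1.get? k with _ | i <;> rcases hll : fl.2.get? k with _ | j
    · rcases h1 hfu hll with h0 | h0 <;> simp [h0]
    · simp [(h2 j hfu hll).1]
    · simp [(h3 i hfu hll).1]
    · obtain ⟨h0, _, _⟩ := h4 i j hfu hll
      by_cases hji : j < i <;> simp [hji] at h0 ⊢ <;> simp [h0]
  have hmemA : ∀ k, pvChar fl.1 fl.2 k = true → k ∈ dA.keys := by
    intro k hc
    have h2 : dA.get? k = some 2 := (hchar k).mpr hc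
    by_contra hmem
    rw [(PySem.Dict.get?_eq_none_iff_not_mem_keys dA k).mpr hmem] at h2
    simp at h2
  have hmemB : ∀ k, pvChar fl.1 fl.2 k = true → k ∈ fl.1.keys := by
    intro k hc
    unfold pvChar at hc
    rcases hfu : fl.1.get? k with _ | i
    · rw [hfu] at hc; rcases fl.2.get? k <;> simp at hc
    · by_contra hmem
      rw [(PySem.Dict.get?_eq_none_iff_not_mem_keys fl.1 k).mpr hmem] at hfu
      simp at hfu
  show (dA.items.foldl (fun cnt kv => if kv.2 = 2 then cnt + 1 else cnt) 0 : Int) =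
    fl.1.items.foldl
      (fun cnt kv => if fl.2.contains kv.1 ∧ fl.2.getD kv.1 0 < kv.2 then cnt + 1 else cnt) 0
  rw [PySem.List.foldl_ite_add_one, PySem.List.foldl_ite_add_one, zero_add, zero_add]
  rw [PySem.Dict.items_eq_map_keys dA ndA 0, PySem.Dict.items_eq_map_keys fl.1 ndB.1 0]
  rw [List.countP_map, List.countP_map]
  have eA : dA.keys.countP ((fun kv => decide (kv.2 = 2)) ∘ (fun k => (k, dA.getD k 0))) =
      dA.keys.countP (pvChar fl.1 fl.2) := by
    refine List.countP_congr (fun k _ => ?_)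
    simp only [Function.comp_apply, decide_eq_true_eq]
    rw [PySem.Dict.getD_eq_get?_getD]
    constructor
    · intro hg
      rcases hg2 : dA.get? k with _ | v
      · rw [hg2] at hg; simp at hg
      · rw [hg2] at hg; simp at hg; exact (hchar k).mp (by rw [hg2, hg])
    · intro hc
      rw [(hchar k).mpr hc]
      rfl
  have eB : fl.1.keys.countP
      ((fun kv => decide (fl.2.contains kv.1 ∧ fl.2.getD kv.1 0 < kv.2)) ∘
        (fun k => (k, fl.1.getD k 0))) = fl.1.keys.countP (pvChar fl.1 fl.2) := by
    refine List.countP_congr (fun k hk => ?_)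
    simp only [Function.comp_apply, decide_eq_true_eq]
    have hfu : ∃ i, fl.1.get? k = some i := by
      rcases hg : fl.1.get? k with _ | i
      · exact absurd ((PySem.Dict.get?_eq_none_iff_not_mem_keys fl.1 k).mp hg) (not_not.mpr hk)
      · exact ⟨i, rfl⟩
    obtain ⟨i, hi⟩ := hfu
    unfold pvChar
    rw [hi, PySem.Dict.contains_eq_isSome_get?, PySem.Dict.getD_eq_get?_getD,
      PySem.Dict.getD_eq_get?_getD, hi]
    rcases hll : fl.2.get? k with _ | j <;> simp
  rw [eA, eB]
  have : (dA.keys.filter (pvChar fl.1 fl.2)).Perm (fl.1.keys.filter (pvChar fl.1 fl.2)) := by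
    refine (List.perm_ext_iff_of_nodup (ndA.filter _) (ndB.1.filter _)).mpr (fun k => ?_)
    simp only [List.mem_filter]
    constructor
    · rintro ⟨_, hc⟩; exact ⟨hmemB k hc, hc⟩
    · rintro ⟨_, hc⟩; exact ⟨hmemA k hc, hc⟩
  rw [List.countP_eq_length_filter, List.countP_eq_length_filter, this.length_eq]

-- ===== VERDICT (by name: the statement is the Claim_ definition above) =====
theorem solution_spec : Claim_equal_solution := by
  intro S _
  exact pvMain S
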